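-- pv_equiv track=rewrite | github.com/patty-chow/cs-313e | WordSearch.py | hL
-- ===== SOURCE A (Python) =====
-- def hL(grid, word):
--   cord = tuple()
--   x = 0
--   for row in grid:
--     my_str = ""
--     x += 1
--     for letter in row:
--       my_str = my_str + letter
--
--     if my_str.find(word) != -1:
--       y = my_str.find(word) + 1
--       cord = (x, y)
--
--   return cord
-- ===== SOURCE B (Python) =====
-- def hL(grid, word):
--     # Scan rows from the bottom; the first (i.e. last) row containing word wins.
--     for i in range(len(grid), 0, -1):
--         j = "".join(grid[i - 1]).find(word)
--         if j != -1:
--             return (i, j + 1)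
--     return tuple()
-- ===== Notes on version B (the rewrite author's own statement) =====
-- stated objective: alternative
-- what changed: B scans the rows in reverse and returns immediately at the first (i.e. last) row whose joined string contains word, instead of A's forward pass that keeps overwriting the last match; rows are joined with ''.join instead of repeated concatenation.
import Mathlib
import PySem

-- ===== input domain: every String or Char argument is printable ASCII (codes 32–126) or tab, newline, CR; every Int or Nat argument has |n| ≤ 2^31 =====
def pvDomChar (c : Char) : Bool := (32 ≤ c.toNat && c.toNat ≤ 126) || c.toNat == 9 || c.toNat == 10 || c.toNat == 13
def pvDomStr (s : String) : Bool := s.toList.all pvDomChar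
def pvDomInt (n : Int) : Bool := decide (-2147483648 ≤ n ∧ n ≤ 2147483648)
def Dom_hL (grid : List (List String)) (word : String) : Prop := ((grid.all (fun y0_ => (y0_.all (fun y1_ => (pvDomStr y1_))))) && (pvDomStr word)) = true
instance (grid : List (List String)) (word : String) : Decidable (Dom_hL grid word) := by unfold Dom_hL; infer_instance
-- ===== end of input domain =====

-- B scans the rows bottom-up and returns at the first match (= A's last match); alternative decomposition, same cost.

-- ===== PORT A =====
-- loop body of A's 'for row in grid': state = (cord, x); my_str built by repeated concatenation
def hLstep (word : String) (st : List Int × Int) (row : List String) : List Int × Int :=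
  let x := st.2 + 1
  let myStr := row.foldl (fun acc letter => acc ++ letter.toList) ([] : List Char)
  if PySem.Chars.find myStr word.toList ≠ -1 then
    ([x, PySem.Chars.find myStr word.toList + 1], x)
  else
    (st.1, x)

def hL (grid : List (List String)) (word : String) : List Int :=
  (grid.foldl (hLstep word) ([], 0)).1

-- ===== PORT B =====
-- B's 'for i in range(len(grid), 0, -1)': recursion over the reversed rows, i = 1-based index of the head
def hLrev (word : String) : List (List String) → Int → List Int
  | [], _ => []
  | r :: rs, i =>
    let j := PySem.Chars.find (PySem.Chars.join [] (r.map String.toList)) word.toList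
    if j ≠ -1 then [i, j + 1] else hLrev word rs (i - 1)

def hL_alt (grid : List (List String)) (word : String) : List Int :=
  hLrev word grid.reverse (grid.length : Int)

-- ===== PRECONDITION & SPEC =====
def Spec_hL (grid : List (List String)) (word : String) (out : List Int) : Prop := out = hL_alt grid word
instance (grid : List (List String)) (word : String) (out : List Int) : Decidable (Spec_hL grid word out) := by unfold Spec_hL; infer_instance

-- ===== CLAIM (what is proved, stated in full; the proofs are below) =====
def Claim_equal_hL : Prop := ∀ (grid : List (List String)) (word : String), Dom_hL grid word → Spec_hL grid word (hL grid word)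

-- ===== LEMMAS AND PROOFS =====

theorem foldl_hLstep_snd (word : String) (l : List (List String)) (st : List Int × Int) :
    (l.foldl (hLstep word) st).2 = st.2 + l.length := by
  induction l generalizing st with
  | nil => simp
  | cons r rs ih =>
    rw [List.foldl_cons, ih]
    have : (hLstep word st r).2 = st.2 + 1 := by
      simp only [hLstep]; split <;> rfl
    rw [this]; simp only [List.length_cons]; push_cast; ring

theorem flatten_intersperse_nil (parts : List (List Char)) :
    (List.intersperse [] parts).flatten = parts.flatten := by
  induction parts with
  | nil => rfl
  | cons p ps ih =>
    cases ps with
    | nil => rfl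
    | cons q qs => simp [List.intersperse] at *; simpa using ih

-- the two ports join a row the same way
theorem rowStr_eq (row : List String) :
    row.foldl (fun acc letter => acc ++ letter.toList) ([] : List Char)
      = PySem.Chars.join [] (row.map String.toList) := by
  rw [PySem.List.foldl_append_eq_flatMap]
  simp [PySem.Chars.join, List.intercalate, flatten_intersperse_nil, List.flatMap_def]

-- main invariant: the forward fold's last match equals the reverse scan's first match (default cord)
theorem key (word : String) (l : List (List String)) (cord : List Int) (x0 : Int) :
    (l.foldl (hLstep word) (cord, x0)).1
      = (if hLrev word l.reverse (x0 + l.length) = [] then cord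
         else hLrev word l.reverse (x0 + l.length)) := by
  induction l using List.reverseRecOn generalizing cord with
  | nil => simp [hLrev]
  | append_singleton l r ih =>
    rw [List.foldl_append, List.foldl_cons, List.foldl_nil,
        List.reverse_append, List.reverse_singleton, List.singleton_append]
    have hsnd := foldl_hLstep_snd word l (cord, x0)
    have hlen : x0 + ((l ++ [r]).length : Int) = (x0 + l.length) + 1 := by
      simp; ring
    rw [hlen]
    simp only [hLstep, hLrev, rowStr_eq, hsnd]
    by_cases h : PySem.Chars.find (PySem.Chars.join [] (r.map String.toList)) word.toList = -1
    · have e : x0 + (l.length : Int) + 1 - 1 = x0 + (l.length : Int) := by ring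
      simp only [h, ne_eq, not_true_eq_false, if_false, e]
      exact ih cord
    · simp only [ne_eq, h, not_false_eq_true, if_true]
      simp

-- ===== VERDICT (by name: the statement is the Claim_ definition above) =====
theorem hL_spec : Claim_equal_hL := by
  intro grid word _
  unfold Spec_hL hL hL_alt
  rw [key]
  simp only [zero_add]
  split
  · next h => exact h.symm
  · rfl
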